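-- pv_equiv track=rewrite | github.com/mineawesomeman/baseball-analysis | Location.py | substr_2_loc_val
-- ===== SOURCE A (Python) =====
-- locations = ['', '2F', '2', '25F', '25', '1S', '23', '23F', '5S', '56S', '15', '1', '13', '34S', '3S', '6S', '6MS',
--              '4MS', '4S', '5F', '5', '56', '6', '6M', '4M', '4', '34', '3', '3F', '5DF', '5D', '56D', '6D', '6MD',
--              '4MD', '4D', '34D', '3D', '3DF', '7LSF', '7LS', '7S', '78S', '8S', '89S', '9S', '9LS', '9LSF', '7LF',
--              '7L', '7', '78', '8', '89', '9', '9L', '9LF', '7LDF', '7LD', '7D', '78D', '8D', '89D', '9D', '9LD', '9LDF',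
--              '78XD', '8XD', '89XD']
--
-- def substr_2_loc_val(inp, start=0):
--     longest_length = 0
--     ans = 0
--     toLook = inp[start:]
--
--     for loc, loc_str in enumerate(locations):
--         if toLook[:len(loc_str)] == loc_str and len(loc_str) > longest_length:
--             longest_length = len(loc_str)
--             ans = loc
--
--     return ans
-- ===== SOURCE B (Python) =====
-- locations = ['', '2F', '2', '25F', '25', '1S', '23', '23F', '5S', '56S', '15', '1', '13', '34S', '3S', '6S', '6MS',
--              '4MS', '4S', '5F', '5', '56', '6', '6M', '4M', '4', '34', '3', '3F', '5DF', '5D', '56D', '6D', '6MD',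
--              '4MD', '4D', '34D', '3D', '3DF', '7LSF', '7LS', '7S', '78S', '8S', '89S', '9S', '9LS', '9LSF', '7LF',
--              '7L', '7', '78', '8', '89', '9', '9L', '9LF', '7LDF', '7LD', '7D', '78D', '8D', '89D', '9D', '9LD', '9LDF',
--              '78XD', '8XD', '89XD']
--
-- # index table: each non-empty location string -> its first index in `locations`
-- _TABLE = {}
-- for _i, _s in enumerate(locations):
--     if _s and _s not in _TABLE:
--         _TABLE[_s] = _i
-- _MAXLEN = max(len(_s) for _s in locations)
--
-- def substr_2_loc_val(inp, start=0):
--     toLook = inp[start:]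
--     for L in range(min(len(toLook), _MAXLEN), 0, -1):
--         v = _TABLE.get(toLook[:L])
--         if v is not None:
--             return v
--     return 0
-- ===== Notes on version B (the rewrite author's own statement) =====
-- stated objective: alternative
-- what changed: Replaces the full scan over all 69 location strings (longest-match fold) by a precomputed hash table from location string to first index plus a loop over at most 4 prefix lengths of the input, longest first.
import Mathlib
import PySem

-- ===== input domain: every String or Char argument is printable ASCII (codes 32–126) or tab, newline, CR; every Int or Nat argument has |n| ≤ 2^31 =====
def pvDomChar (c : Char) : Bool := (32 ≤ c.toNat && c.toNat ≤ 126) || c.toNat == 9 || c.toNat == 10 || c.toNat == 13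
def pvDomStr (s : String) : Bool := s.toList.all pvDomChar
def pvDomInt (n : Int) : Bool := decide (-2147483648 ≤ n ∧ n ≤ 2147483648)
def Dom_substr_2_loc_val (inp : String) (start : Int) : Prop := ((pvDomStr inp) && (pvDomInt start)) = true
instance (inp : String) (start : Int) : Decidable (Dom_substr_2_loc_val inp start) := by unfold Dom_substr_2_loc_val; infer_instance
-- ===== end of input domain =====

-- B replaces A's full scan of all 69 location strings by a precomputed first-index table
-- consulted for the input's prefixes, longest first (objective: alternative algorithm).

-- ===== PORT A =====
def pvLocations : List String :=
  ["", "2F", "2", "25F", "25", "1S", "23", "23F", "5S", "56S", "15", "1", "13", "34S", "3S", "6S", "6MS",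
   "4MS", "4S", "5F", "5", "56", "6", "6M", "4M", "4", "34", "3", "3F", "5DF", "5D", "56D", "6D", "6MD",
   "4MD", "4D", "34D", "3D", "3DF", "7LSF", "7LS", "7S", "78S", "8S", "89S", "9S", "9LS", "9LSF", "7LF",
   "7L", "7", "78", "8", "89", "9", "9L", "9LF", "7LDF", "7LD", "7D", "78D", "8D", "89D", "9D", "9LD", "9LDF",
   "78XD", "8XD", "89XD"]

def substr_2_loc_val (inp : String) (start : Int) : Int :=
  let toLook := PySem.Str.slice inp (some start) none
  let res := (PySem.List.enumerate pvLocations).foldl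
    (fun (st : Int × Int) (p : Int × String) =>
      if (PySem.Str.slice toLook none (some (PySem.Str.len p.2)) == p.2)
          && decide (PySem.Str.len p.2 > st.1)
      then (PySem.Str.len p.2, p.1) else st) (0, 0)
  res.2

-- ===== PORT B =====
-- module-level loop of Source B building _TABLE (first index of each non-empty location string)
def pvBuild (d : PySem.Dict String Int) (l : List (Int × String)) : PySem.Dict String Int :=
  l.foldl (fun d p => if (p.2 != "") && !(d.contains p.2) then d.insert p.2 p.1 else d) d

def pvTable : PySem.Dict String Int := pvBuild PySem.Dict.empty (PySem.List.enumerate pvLocations)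

def pvMaxLen : Int := ((PySem.List.max? (pvLocations.map PySem.Str.len) id).getD 0)

-- the early-returning 'for L in range(...)' loop of Source B (the table passed as a parameter)
def pvAltLoop (d : PySem.Dict String Int) (toLook : String) : List Int → Int
  | [] => 0
  | L :: rest =>
    match d.get? (PySem.Str.slice toLook none (some L)) with
    | some v => v
    | none => pvAltLoop d toLook rest

def substr_2_loc_val_alt (inp : String) (start : Int) : Int :=
  let toLook := PySem.Str.slice inp (some start) none
  pvAltLoop pvTable toLook (PySem.List.pyRange (min (PySem.Str.len toLook) pvMaxLen) 0 (-1))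

-- ===== PRECONDITION & SPEC =====
def Spec_substr_2_loc_val (inp : String) (start : Int) (out : Int) : Prop := out = substr_2_loc_val_alt inp start
instance (inp : String) (start : Int) (out : Int) : Decidable (Spec_substr_2_loc_val inp start out) := by unfold Spec_substr_2_loc_val; infer_instance

-- ===== CLAIM (what is proved, stated in full; the proofs are below) =====
def Claim_equal_substr_2_loc_val : Prop := ∀ (inp : String) (start : Int), Dom_substr_2_loc_val inp start → Spec_substr_2_loc_val inp start (substr_2_loc_val inp start)

-- ===== LEMMAS AND PROOFS =====

-- list-level mirror of A's loop test and state update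
def pvMatc (cs : List Char) (w : String) : Bool := cs.take w.toList.length == w.toList
def pvPlen (w : String) : Int := (w.toList.length : Int)
def pvStepA (cs : List Char) (st : Int × Int) (p : Int × String) : Int × Int :=
  if pvMatc cs p.2 && decide (pvPlen p.2 > st.1) then (pvPlen p.2, p.1) else st
def pvMx (cs : List Char) (l : List (Int × String)) (a : Int) : Int :=
  l.foldl (fun m p => if pvMatc cs p.2 && decide (pvPlen p.2 > m) then pvPlen p.2 else m) a

theorem pvMx_cons (cs : List Char) (p : Int × String) (l : List (Int × String)) (a : Int) :
    pvMx cs (p :: l) a = pvMx cs l (if pvMatc cs p.2 && decide (pvPlen p.2 > a) then pvPlen p.2 else a) := rfl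

theorem le_pvMx (cs : List Char) : ∀ (l : List (Int × String)) (a : Int), a ≤ pvMx cs l a := by
  intro l
  induction l with
  | nil => intro a; simp [pvMx]
  | cons p l ih =>
    intro a
    rw [pvMx_cons]
    by_cases hc : (pvMatc cs p.2 && decide (pvPlen p.2 > a)) = true
    · rw [if_pos hc]
      have hparts : pvMatc cs p.2 = true ∧ pvPlen p.2 > a := by simpa using hc
      exact le_trans (le_of_lt hparts.2) (ih _)
    · rw [if_neg hc]
      exact ih a

theorem pvMx_le (cs : List Char) : ∀ (l : List (Int × String)) (a c : Int), a ≤ c →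
    (∀ q ∈ l, pvMatc cs q.2 → pvPlen q.2 ≤ c) → pvMx cs l a ≤ c := by
  intro l
  induction l with
  | nil => intro a c h _; simpa [pvMx] using h
  | cons p l ih =>
    intro a c h hall
    rw [pvMx_cons]
    refine ih _ c ?_ (fun q hq => hall q (List.mem_cons_of_mem _ hq))
    by_cases hc : (pvMatc cs p.2 && decide (pvPlen p.2 > a)) = true
    · rw [if_pos hc]
      have hparts : pvMatc cs p.2 = true ∧ pvPlen p.2 > a := by simpa using hc
      exact hall p List.mem_cons_self hparts.1
    · rw [if_neg hc]
      exact h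

theorem pvMx_mem_le (cs : List Char) : ∀ (l : List (Int × String)) (a : Int) (q : Int × String),
    q ∈ l → pvMatc cs q.2 → pvPlen q.2 ≤ pvMx cs l a := by
  intro l
  induction l with
  | nil => intro a q hq; simp at hq
  | cons p l ih =>
    intro a q hq hm
    rw [pvMx_cons]
    rcases List.mem_cons.mp hq with rfl | hq
    · refine le_trans ?_ (le_pvMx cs l _)
      by_cases hc : (pvMatc cs q.2 && decide (pvPlen q.2 > a)) = true
      · rw [if_pos hc]
      · rw [if_neg hc]
        have : ¬ (pvMatc cs q.2 = true ∧ pvPlen q.2 > a) := by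
          simpa [Bool.and_eq_true] using hc
        have hna : ¬ pvPlen q.2 > a := fun hgt => this ⟨hm, hgt⟩
        omega
    · exact ih _ q hq hm

theorem pvFind_none (cs : List Char) : ∀ (l : List (Int × String)) (a : Int),
    l.find? (fun q => pvMatc cs q.2 && (pvPlen q.2 == pvMx cs l a)) = none → pvMx cs l a = a := by
  intro l
  induction l with
  | nil => intro a _; rfl
  | cons p l ih =>
    intro a hf
    rw [pvMx_cons] at hf ⊢
    by_cases hup : (pvMatc cs p.2 && decide (pvPlen p.2 > a)) = true
    · rw [if_pos hup] at hf ⊢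
      simp only [List.find?_cons] at hf
      cases hcase : (pvMatc cs p.2 && (pvPlen p.2 == pvMx cs l (pvPlen p.2))) with
      | true => rw [hcase] at hf; cases hf
      | false =>
        rw [hcase] at hf
        have heq := ih (pvPlen p.2) hf
        have hm : pvMatc cs p.2 = true := by
          have hparts : pvMatc cs p.2 = true ∧ pvPlen p.2 > a := by simpa using hup
          exact hparts.1
        rw [heq] at hcase
        simp [hm] at hcase
    · rw [if_neg hup] at hf ⊢
      simp only [List.find?_cons] at hf
      cases hcase : (pvMatc cs p.2 && (pvPlen p.2 == pvMx cs l a)) with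
      | true => rw [hcase] at hf; cases hf
      | false => rw [hcase] at hf; exact ih a hf

theorem pvFoldA (cs : List Char) : ∀ (l : List (Int × String)) (a r : Int),
    l.foldl (pvStepA cs) (a, r) =
      (pvMx cs l a,
       if a < pvMx cs l a then
         match l.find? (fun q => pvMatc cs q.2 && (pvPlen q.2 == pvMx cs l a)) with
         | some q => q.1
         | none => r
       else r) := by
  intro l
  induction l with
  | nil => intro a r; simp [pvMx]
  | cons p l ih =>
    intro a r
    rw [List.foldl_cons]
    by_cases hc : (pvMatc cs p.2 && decide (pvPlen p.2 > a)) = true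
    · have hparts : pvMatc cs p.2 = true ∧ pvPlen p.2 > a := by simpa using hc
      have hm : pvMatc cs p.2 = true := hparts.1
      have hgt : a < pvPlen p.2 := hparts.2
      have hstep : pvStepA cs (a, r) p = (pvPlen p.2, p.1) := by simp [pvStepA, hc]
      rw [hstep, ih, pvMx_cons, if_pos hc]
      simp only [List.find?_cons]
      have hle : pvPlen p.2 ≤ pvMx cs l (pvPlen p.2) := le_pvMx cs l _
      by_cases heq : pvMx cs l (pvPlen p.2) = pvPlen p.2
      · have hpred : (pvMatc cs p.2 && (pvPlen p.2 == pvMx cs l (pvPlen p.2))) = true := by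
          rw [heq]; simp [hm]
        rw [hpred, heq]
        simp [hgt]
      · have hlt : pvPlen p.2 < pvMx cs l (pvPlen p.2) := lt_of_le_of_ne hle (fun h => heq h.symm)
        have hpred : (pvMatc cs p.2 && (pvPlen p.2 == pvMx cs l (pvPlen p.2))) = false := by
          simp only [hm, Bool.true_and, beq_eq_false_iff_ne, ne_eq]
          omega
        rw [hpred]
        obtain ⟨q, hq⟩ : ∃ q, l.find? (fun q => pvMatc cs q.2 && (pvPlen q.2 == pvMx cs l (pvPlen p.2))) = some q := by
          cases hf : l.find? (fun q => pvMatc cs q.2 && (pvPlen q.2 == pvMx cs l (pvPlen p.2))) with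
          | some q => exact ⟨q, rfl⟩
          | none => exact absurd (pvFind_none cs l (pvPlen p.2) hf) (by omega)
        rw [hq]
        simp [hlt, lt_trans hgt hlt]
    · have hc' : (pvMatc cs p.2 && decide (pvPlen p.2 > a)) = false := by simpa using hc
      have hstep : pvStepA cs (a, r) p = (a, r) := by simp [pvStepA, hc']
      rw [hstep, ih, pvMx_cons, if_neg hc]
      simp only [List.find?_cons]
      by_cases hlt : a < pvMx cs l a
      · have hpred : (pvMatc cs p.2 && (pvPlen p.2 == pvMx cs l a)) = false := by
          cases hmv : pvMatc cs p.2 with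
          | false => simp
          | true =>
            have hand : ¬ (pvMatc cs p.2 = true ∧ pvPlen p.2 > a) := by
              simpa using hc
            have hna : ¬ pvPlen p.2 > a := fun hgt => hand ⟨hmv, hgt⟩
            simp only [Bool.true_and, beq_eq_false_iff_ne, ne_eq]
            omega
        rw [hpred]
      · simp [hlt]

-- A's per-element test, rewritten on the character-list side
theorem pvCond_eq (t : String) (w : String) :
    (PySem.Str.slice t none (some (PySem.Str.len w)) == w) = pvMatc t.toList w := by
  rw [Bool.eq_iff_iff]
  simp only [beq_iff_eq, pvMatc, PySem.Str.len_eq, ← String.toList_inj, PySem.Str.toList_slice,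
    PySem.Chars.slice_eq_listSlice]
  rw [PySem.List.slice_to _ (Int.natCast_nonneg _), Int.toNat_natCast]

theorem pvBridgeA (t : String) :
    (PySem.List.enumerate pvLocations).foldl
      (fun (st : Int × Int) (p : Int × String) =>
        if (PySem.Str.slice t none (some (PySem.Str.len p.2)) == p.2)
            && decide (PySem.Str.len p.2 > st.1)
        then (PySem.Str.len p.2, p.1) else st) ((0:Int), (0:Int))
    = (PySem.List.enumerate pvLocations).foldl (pvStepA t.toList) ((0:Int), (0:Int)) := by
  have hfun : (fun (st : Int × Int) (p : Int × String) =>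
        if (PySem.Str.slice t none (some (PySem.Str.len p.2)) == p.2)
            && decide (PySem.Str.len p.2 > st.1)
        then (PySem.Str.len p.2, p.1) else st) = pvStepA t.toList := by
    funext st p
    rw [pvCond_eq t p.2, PySem.Str.len_eq]
    simp [pvStepA, pvPlen]
  rw [hfun]

-- the table built by Source B's module loop never touches keys it already holds
theorem pvBuild_contains_get? : ∀ (l : List (Int × String)) (d : PySem.Dict String Int) (w : String),
    d.contains w = true → (pvBuild d l).get? w = d.get? w := by
  intro l
  induction l with
  | nil => intro d w _; rfl
  | cons p l ih =>
    intro d w hc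
    show (pvBuild (if (p.2 != "") && !(d.contains p.2) then d.insert p.2 p.1 else d) l).get? w = d.get? w
    by_cases hcond : ((p.2 != "") && !(d.contains p.2)) = true
    · rw [if_pos hcond]
      have hne : w ≠ p.2 := by
        intro h
        subst h
        simp [hc] at hcond
      rw [ih _ w (by simp [PySem.Dict.contains_insert, hc]),
        PySem.Dict.get?_insert_of_ne _ _ hne]
    · rw [if_neg hcond]
      exact ih _ w hc

-- lookup in the table = first index of w in the enumerated location list (w ≠ "")
theorem pvBuild_get? : ∀ (l : List (Int × String)) (d : PySem.Dict String Int) (w : String),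
    w ≠ "" → d.contains w = false →
    (pvBuild d l).get? w = (l.find? (fun q => q.2 == w)).map (fun q => q.1) := by
  intro l
  induction l with
  | nil =>
    intro d w _ hc
    rw [List.find?_nil]
    show d.get? w = Option.map (fun (q : Int × String) => q.1) none
    cases hgo : d.get? w with
    | none => rfl
    | some v =>
      exfalso
      rw [PySem.Dict.contains_eq_isSome_get?, hgo] at hc
      simp at hc
  | cons p l ih =>
    intro d w hw hc
    show (pvBuild (if (p.2 != "") && !(d.contains p.2) then d.insert p.2 p.1 else d) l).get? w
      = ((p :: l).find? (fun q => q.2 == w)).map (fun q => q.1)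
    simp only [List.find?_cons]
    by_cases hpw : p.2 = w
    · subst hpw
      have hcond : ((p.2 != "") && !(d.contains p.2)) = true := by
        simp [hc, hw]
      rw [if_pos hcond]
      rw [pvBuild_contains_get? l _ p.2 (by simp [PySem.Dict.contains_insert_self]),
        PySem.Dict.get?_insert_self]
      simp
    · have hfalse : (p.2 == w) = false := by simp [hpw]
      rw [hfalse]
      have hwp : w ≠ p.2 := fun h => hpw h.symm
      by_cases hcond : ((p.2 != "") && !(d.contains p.2)) = true
      · rw [if_pos hcond]
        refine ih _ w hw ?_
        rw [PySem.Dict.contains_insert]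
        simp [hc, hwp]
      · rw [if_neg hcond]
        exact ih _ w hw hc

theorem pvTable_get? (w : String) (hw : w ≠ "") :
    pvTable.get? w
      = ((PySem.List.enumerate pvLocations).find? (fun q => q.2 == w)).map (fun q => q.1) :=
  pvBuild_get? _ _ w hw (PySem.Dict.contains_empty w)

theorem pvMatc_len_le (cs : List Char) (w : String) (h : pvMatc cs w = true) :
    (w.toList.length : Int) ≤ (cs.length : Int) := by
  simp only [pvMatc, beq_iff_eq] at h
  have hlen := congrArg List.length h
  rw [List.length_take] at hlen
  omega

-- no location of length L > M matches: the table misses on that prefix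
theorem pvMiss (t : String) (L : Int) (h0 : 0 < L) (hn : L ≤ (t.toList.length : Int))
    (hM : pvMx t.toList (PySem.List.enumerate pvLocations) 0 < L) :
    pvTable.get? (PySem.Str.slice t none (some L)) = none := by
  have hwl : (PySem.Str.slice t none (some L)).toList = t.toList.take L.toNat := by
    rw [PySem.Str.toList_slice, PySem.Chars.slice_eq_listSlice, PySem.List.slice_to _ (le_of_lt h0)]
  have hlen : (PySem.Str.slice t none (some L)).toList.length = L.toNat := by
    rw [hwl, List.length_take]
    omega
  have hw : PySem.Str.slice t none (some L) ≠ "" := by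
    intro h
    rw [h] at hlen
    have hnil : ("" : String).toList = [] := rfl
    rw [hnil] at hlen
    simp at hlen
    omega
  cases hget : pvTable.get? (PySem.Str.slice t none (some L)) with
  | none => rfl
  | some v =>
    exfalso
    rw [pvTable_get? _ hw] at hget
    cases hf : (PySem.List.enumerate pvLocations).find? (fun q => q.2 == PySem.Str.slice t none (some L)) with
    | none => rw [hf] at hget; cases hget
    | some q =>
      have hqmem := List.mem_of_find?_eq_some hf
      have hqw : q.2 = PySem.Str.slice t none (some L) := by
        have := List.find?_some hf
        simpa [beq_iff_eq] using this
      have hq2 : q.2.toList = t.toList.take L.toNat := by rw [hqw, hwl]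
      have hq2len : q.2.toList.length = L.toNat := by
        rw [hq2, List.length_take]
        omega
      have hmatc : pvMatc t.toList q.2 = true := by
        simp only [pvMatc]
        rw [hq2len, hq2]
        simp
      have hle := pvMx_mem_le t.toList _ 0 q hqmem hmatc
      have hplen : pvPlen q.2 = L := by
        simp only [pvPlen, hq2len]
        omega
      omega

-- the location of length M that matches: the table hits with A's answer index
theorem pvHit (t : String) (q : Int × String)
    (hf : (PySem.List.enumerate pvLocations).find?
        (fun p => pvMatc t.toList p.2 && (pvPlen p.2 == pvMx t.toList (PySem.List.enumerate pvLocations) 0)) = some q)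
    (h1 : 1 ≤ pvMx t.toList (PySem.List.enumerate pvLocations) 0)
    (hn : pvMx t.toList (PySem.List.enumerate pvLocations) 0 ≤ (t.toList.length : Int)) :
    pvTable.get? (PySem.Str.slice t none (some (pvMx t.toList (PySem.List.enumerate pvLocations) 0))) = some q.1 := by
  set M := pvMx t.toList (PySem.List.enumerate pvLocations) 0 with hMdef
  have hwl : (PySem.Str.slice t none (some M)).toList = t.toList.take M.toNat := by
    rw [PySem.Str.toList_slice, PySem.Chars.slice_eq_listSlice, PySem.List.slice_to _ (by omega)]
  have hlen : (PySem.Str.slice t none (some M)).toList.length = M.toNat := by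
    rw [hwl, List.length_take]
    omega
  have hw : PySem.Str.slice t none (some M) ≠ "" := by
    intro h
    rw [h] at hlen
    have hnil : ("" : String).toList = [] := rfl
    rw [hnil] at hlen
    simp at hlen
    omega
  rw [pvTable_get? _ hw]
  have hpred : (fun (p : Int × String) => p.2 == PySem.Str.slice t none (some M))
      = (fun p => pvMatc t.toList p.2 && (pvPlen p.2 == M)) := by
    funext p
    rw [Bool.eq_iff_iff]
    simp only [beq_iff_eq, Bool.and_eq_true, pvMatc, pvPlen, ← String.toList_inj, hwl]
    constructor
    · intro h
      have hl : p.2.toList.length = M.toNat := by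
        rw [h, List.length_take]
        omega
      exact ⟨by rw [hl]; exact h.symm, by rw [hl]; omega⟩
    · rintro ⟨h1', h2'⟩
      have hl : p.2.toList.length = M.toNat := by omega
      rw [← h1', hl]
  rw [hpred, hf]
  rfl

-- unfolding Source B's loop down a countdown range: all lengths above M miss, M hits
theorem pvAltLoop_nil (d : PySem.Dict String Int) (toLook : String) : pvAltLoop d toLook [] = 0 := rfl

theorem pvAltLoop_cons_some (d : PySem.Dict String Int) (toLook : String) (L v : Int) (rest : List Int)
    (hv : d.get? (PySem.Str.slice toLook none (some L)) = some v) :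
    pvAltLoop d toLook (L :: rest) = v := by
  conv_lhs => unfold pvAltLoop
  rw [hv]

theorem pvAltLoop_cons_none (d : PySem.Dict String Int) (toLook : String) (L : Int) (rest : List Int)
    (hv : d.get? (PySem.Str.slice toLook none (some L)) = none) :
    pvAltLoop d toLook (L :: rest) = pvAltLoop d toLook rest := by
  conv_lhs => unfold pvAltLoop
  rw [hv]

theorem pvLoopZero (t : String)
    (hM : pvMx t.toList (PySem.List.enumerate pvLocations) 0 = 0) :
    ∀ (j : Nat), (j : Int) ≤ (t.toList.length : Int) →
      pvAltLoop pvTable t (PySem.List.pyRange (j : Int) 0 (-1)) = 0 := by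
  intro j
  induction j with
  | zero => intro _; rw [PySem.List.pyRange_neg_one_eq_nil (by norm_num)]; exact pvAltLoop_nil pvTable t
  | succ j ih =>
    intro hj
    rw [PySem.List.pyRange_neg_one_cons (by omega)]
    have harg : ((j+1 : Nat) : Int) - 1 = (j : Int) := by omega
    rw [harg, pvAltLoop_cons_none pvTable t _ _ (pvMiss t _ (by omega) hj (by omega))]
    exact ih (by omega)

theorem pvLoopHit (t : String) (q : Int × String)
    (hf : (PySem.List.enumerate pvLocations).find?
        (fun p => pvMatc t.toList p.2 && (pvPlen p.2 == pvMx t.toList (PySem.List.enumerate pvLocations) 0)) = some q)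
    (h1 : 1 ≤ pvMx t.toList (PySem.List.enumerate pvLocations) 0) :
    ∀ (j : Nat), pvMx t.toList (PySem.List.enumerate pvLocations) 0 ≤ (j : Int) →
      (j : Int) ≤ (t.toList.length : Int) →
      pvAltLoop pvTable t (PySem.List.pyRange (j : Int) 0 (-1)) = q.1 := by
  intro j
  induction j with
  | zero => intro h _; exfalso; omega
  | succ j ih =>
    intro hMj hj
    rw [PySem.List.pyRange_neg_one_cons (by omega)]
    have harg : ((j+1 : Nat) : Int) - 1 = (j : Int) := by omega
    rw [harg]
    by_cases heq : pvMx t.toList (PySem.List.enumerate pvLocations) 0 = ((j+1 : Nat) : Int)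
    · rw [← heq]
      exact pvAltLoop_cons_some pvTable t _ _ _ (pvHit t q hf h1 (by omega))
    · rw [pvAltLoop_cons_none pvTable t _ _ (pvMiss t _ (by omega) hj (by omega))]
      exact ih (by omega) (by omega)

theorem pvCore (t : String) :
    ((PySem.List.enumerate pvLocations).foldl (pvStepA t.toList) ((0:Int), (0:Int))).2
      = pvAltLoop pvTable t (PySem.List.pyRange (min (PySem.Str.len t) pvMaxLen) 0 (-1)) := by
  have hmax : pvMaxLen = 4 := by decide
  have hall4 : ∀ q ∈ PySem.List.enumerate pvLocations, pvPlen q.2 ≤ 4 := by decide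
  have hM0 : 0 ≤ pvMx t.toList (PySem.List.enumerate pvLocations) 0 :=
    le_pvMx t.toList _ 0
  have hM4 : pvMx t.toList (PySem.List.enumerate pvLocations) 0 ≤ 4 :=
    pvMx_le t.toList _ 0 4 (by norm_num) (fun q hq _ => hall4 q hq)
  have hMn : pvMx t.toList (PySem.List.enumerate pvLocations) 0 ≤ (t.toList.length : Int) :=
    pvMx_le t.toList _ 0 _ (by positivity) (fun q _ hm => pvMatc_len_le t.toList q.2 hm)
  have hmin : min ((t.toList.length : Nat) : Int) (4 : Int) = ((min t.toList.length 4 : Nat) : Int) := by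
    omega
  rw [pvFoldA, hmax, PySem.Str.len_eq, hmin]
  by_cases hM : pvMx t.toList (PySem.List.enumerate pvLocations) 0 = 0
  · rw [pvLoopZero t hM _ (by omega)]
    simp [hM]
  · have h1 : 1 ≤ pvMx t.toList (PySem.List.enumerate pvLocations) 0 := by omega
    obtain ⟨q, hq⟩ : ∃ q, (PySem.List.enumerate pvLocations).find?
        (fun p => pvMatc t.toList p.2 && (pvPlen p.2 == pvMx t.toList (PySem.List.enumerate pvLocations) 0)) = some q := by
      cases hf : (PySem.List.enumerate pvLocations).find?
          (fun p => pvMatc t.toList p.2 && (pvPlen p.2 == pvMx t.toList (PySem.List.enumerate pvLocations) 0)) with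
      | some q => exact ⟨q, rfl⟩
      | none => exact absurd (pvFind_none t.toList _ 0 hf) hM
    rw [pvLoopHit t q hq h1 _ (by omega) (by omega)]
    simp [hq, show (0:Int) < pvMx t.toList (PySem.List.enumerate pvLocations) 0 by omega]

-- ===== VERDICT (by name: the statement is the Claim_ definition above) =====
theorem substr_2_loc_val_spec : Claim_equal_substr_2_loc_val := by
  intro inp start _
  show substr_2_loc_val inp start = substr_2_loc_val_alt inp start
  show ((PySem.List.enumerate pvLocations).foldl
      (fun (st : Int × Int) (p : Int × String) =>
        if (PySem.Str.slice (PySem.Str.slice inp (some start) none) none (some (PySem.Str.len p.2)) == p.2)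
            && decide (PySem.Str.len p.2 > st.1)
        then (PySem.Str.len p.2, p.1) else st) ((0:Int), (0:Int))).2
    = pvAltLoop pvTable (PySem.Str.slice inp (some start) none)
        (PySem.List.pyRange (min (PySem.Str.len (PySem.Str.slice inp (some start) none)) pvMaxLen) 0 (-1))
  rw [pvBridgeA]
  exact pvCore _
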